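-- pv_equiv track=rewrite | github.com/Gabriel-Petersen/DungeonGame-Tkinter | DungeonRunner/Dungeon.py | VisibilitySettings
-- ===== SOURCE A (Python) =====
-- def VisibilitySettings(board, moveCount):
--     visibleBoard = list()
--
--     for i in range(5):
--         visibleBoard.append([-1, -1, -1, -1, -1])
--     for i in range(5):
--         for j in range(5):
--             if board[i][j] == 1:
--                 visibleBoard[i][j] = 1
--                 if moveCount > 0:
--                     if i > 0:
--                         visibleBoard[i-1][j] = 1
--
--                     if i < 4:
--                         visibleBoard[i+1][j] = 1
--
--                     if j > 0:
--                         visibleBoard[i][j-1] = 1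
--                     if j < 4:
--                         visibleBoard[i][j+1] = 1
--
--     return visibleBoard
-- ===== SOURCE B (Python) =====
-- def VisibilitySettings(board, moveCount):
--     # gather: each cell decides its own value from itself and its in-bounds neighbours
--     def lit(i, j):
--         if board[i][j] == 1:
--             return 1
--         if moveCount > 0 and ((i > 0 and board[i-1][j] == 1)
--                               or (i < 4 and board[i+1][j] == 1)
--                               or (j > 0 and board[i][j-1] == 1)
--                               or (j < 4 and board[i][j+1] == 1)):
--             return 1
--         return -1
--     return [[lit(i, j) for j in range(5)] for i in range(5)]
-- ===== Notes on version B (the rewrite author's own statement) =====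
-- stated objective: simpler
-- what changed: Scatter-to-gather: instead of initialising a -1 matrix and writing 1s outward from every lit cell, B builds the 5x5 mask directly, each cell reading itself and its in-bounds orthogonal neighbours (guarded by moveCount>0).
import Mathlib
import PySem

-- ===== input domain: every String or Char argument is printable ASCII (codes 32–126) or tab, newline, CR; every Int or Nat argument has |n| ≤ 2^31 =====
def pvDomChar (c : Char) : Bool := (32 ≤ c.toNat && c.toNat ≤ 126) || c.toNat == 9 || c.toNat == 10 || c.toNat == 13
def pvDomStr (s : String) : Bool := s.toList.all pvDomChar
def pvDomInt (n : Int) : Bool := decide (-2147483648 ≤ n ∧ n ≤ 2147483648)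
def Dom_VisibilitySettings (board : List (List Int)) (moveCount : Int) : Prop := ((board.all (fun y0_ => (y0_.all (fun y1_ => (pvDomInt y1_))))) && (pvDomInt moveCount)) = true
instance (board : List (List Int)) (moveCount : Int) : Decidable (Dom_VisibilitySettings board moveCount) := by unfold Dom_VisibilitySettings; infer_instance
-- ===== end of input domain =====

-- B rewrites A's scatter (write 1s outward from each lit cell into a -1 matrix) as a gather
-- (each cell reads itself and its in-bounds orthogonal neighbours); equal on Pre_ (boards A indexes without raising).

-- ===== PORT A =====
-- board[i][j]; all reads are at indices 0..4, in range under Pre_ (default 0 is never reached there)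
def pyCell (board : List (List Int)) (i j : Int) : Int :=
  PySem.List.pyGetD (PySem.List.pyGetD board i []) j 0

-- visibleBoard[i][j] = 1 ; loop indices are 0..4, nonnegative, so .toNat is exact
def pySet2 (m : List (List Int)) (i j v : Int) : List (List Int) :=
  m.modify i.toNat (fun r => r.set j.toNat v)

-- the body of A's inner loop, verbatim
def stepA (board : List (List Int)) (moveCount : Int) (vb : List (List Int)) (i j : Int) : List (List Int) :=
  if pyCell board i j = 1 then
    let vb1 := pySet2 vb i j 1
    if moveCount > 0 then
      let vb2 := if i > 0 then pySet2 vb1 (i-1) j 1 else vb1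
      let vb3 := if i < 4 then pySet2 vb2 (i+1) j 1 else vb2
      let vb4 := if j > 0 then pySet2 vb3 i (j-1) 1 else vb3
      if j < 4 then pySet2 vb4 i (j+1) 1 else vb4
    else vb1
  else vb

def VisibilitySettings (board : List (List Int)) (moveCount : Int) : List (List Int) :=
  let init := (PySem.List.pyRange 0 5 1).foldl (fun vb _ => vb ++ [[-1, -1, -1, -1, -1]]) []
  (PySem.List.pyRange 0 5 1).foldl (fun vb i =>
    (PySem.List.pyRange 0 5 1).foldl (fun vb j => stepA board moveCount vb i j) vb) init

-- ===== PORT B =====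
def VisibilitySettings_alt (board : List (List Int)) (moveCount : Int) : List (List Int) :=
  (PySem.List.pyRange 0 5 1).map (fun i =>
    (PySem.List.pyRange 0 5 1).map (fun j =>
      if pyCell board i j = 1 then 1
      else if moveCount > 0 ∧ ((i > 0 ∧ pyCell board (i-1) j = 1)
                             ∨ (i < 4 ∧ pyCell board (i+1) j = 1)
                             ∨ (j > 0 ∧ pyCell board i (j-1) = 1)
                             ∨ (j < 4 ∧ pyCell board i (j+1) = 1)) then 1
      else -1))

-- ===== PRECONDITION & SPEC =====
-- Pre_ excludes exactly the boards on which A raises IndexError: fewer than 5 rows,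
-- or one of the first 5 rows shorter than 5.
def Pre_VisibilitySettings (board : List (List Int)) (moveCount : Int) : Prop :=
  5 ≤ board.length ∧ ∀ r ∈ board.take 5, 5 ≤ r.length
instance (board : List (List Int)) (moveCount : Int) : Decidable (Pre_VisibilitySettings board moveCount) := by unfold Pre_VisibilitySettings; infer_instance

def pvWitness_VisibilitySettings : List (List Int) × Int :=
  ([[0,0,0,0,0],[0,1,0,0,0],[0,0,0,0,0],[0,0,0,0,0],[0,0,0,0,0]], 1)

def Spec_VisibilitySettings (board : List (List Int)) (moveCount : Int) (out : List (List Int)) : Prop := out = VisibilitySettings_alt board moveCount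
instance (board : List (List Int)) (moveCount : Int) (out : List (List Int)) : Decidable (Spec_VisibilitySettings board moveCount out) := by unfold Spec_VisibilitySettings; infer_instance

-- ===== CLAIM (what is proved, stated in full; the proofs are below) =====
def Claim_equal_VisibilitySettings : Prop := ∀ (board : List (List Int)) (moveCount : Int), Dom_VisibilitySettings board moveCount → Pre_VisibilitySettings board moveCount → Spec_VisibilitySettings board moveCount (VisibilitySettings board moveCount)

-- ===== LEMMAS AND PROOFS =====

def cell (m : List (List Int)) (p q : Nat) : Int := (m.getD p []).getD q 0

def Shape (m : List (List Int)) : Prop := m.length = 5 ∧ ∀ r ∈ m, r.length = 5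

-- which cells (p,q) the step for source (i,j) writes (always the value 1)
def hitA (board : List (List Int)) (moveCount : Int) (i j : Int) (p q : Nat) : Bool :=
  decide (pyCell board i j = 1 ∧
    (((p : Int) = i ∧ (q : Int) = j) ∨
      (moveCount > 0 ∧ (((p : Int) = i - 1 ∧ (q : Int) = j)
                      ∨ ((p : Int) = i + 1 ∧ (q : Int) = j)
                      ∨ ((p : Int) = i ∧ (q : Int) = j - 1)
                      ∨ ((p : Int) = i ∧ (q : Int) = j + 1)))))

lemma range5 : PySem.List.pyRange 0 5 1 = [0, 1, 2, 3, 4] := by decide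

lemma shape_set2 (m : List (List Int)) (i j v : Int) (h : Shape m) : Shape (pySet2 m i j v) := by
  obtain ⟨h1, h2⟩ := h
  refine ⟨by simp [pySet2, h1], ?_⟩
  intro r hr
  simp only [pySet2] at hr
  obtain ⟨k, hk, rfl⟩ := List.mem_iff_getElem.1 hr
  rw [List.getElem_modify]
  split <;> simp [h2 _ (List.getElem_mem _)]

lemma cell_set2 (m : List (List Int)) (i j v : Int) (p q : Nat)
    (hm : Shape m) (hi : 0 ≤ i) (hj : 0 ≤ j) (hp : p < 5) (hq : q < 5) :
    cell (pySet2 m i j v) p q = if (p : Int) = i ∧ (q : Int) = j then v else cell m p q := by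
  obtain ⟨h1, h2⟩ := hm
  have hpl : p < m.length := by omega
  simp only [cell, pySet2, List.getD_eq_getElem?_getD, List.getElem?_modify]
  by_cases hip : i.toNat = p
  · have heq : (p : Int) = i := by omega
    simp only [hip, heq, List.getElem?_eq_getElem hpl, Option.getD_some]
    by_cases hjq : j.toNat = q
    · have heq2 : (q : Int) = j := by omega
      have : q < (m[p]).length := by rw [h2 _ (List.getElem_mem hpl)]; omega
      simp [hjq, heq2, this]
    · have : ¬((q : Int) = j) := by omega
      simp [hjq, this]
  · have : ¬((p : Int) = i) := by omega
    simp [hip, this]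

lemma cell_cset (c : Prop) [Decidable c] (m : List (List Int)) (i' j' : Int) (p q : Nat)
    (hm : Shape m) (hi' : c → 0 ≤ i') (hj' : c → 0 ≤ j') (hp : p < 5) (hq : q < 5) :
    cell (if c then pySet2 m i' j' 1 else m) p q
      = if c ∧ (p : Int) = i' ∧ (q : Int) = j' then 1 else cell m p q := by
  split_ifs with h1 h2 h3
  · rw [cell_set2 _ _ _ _ _ _ hm (hi' h1) (hj' h1) hp hq, if_pos h2.2]
  · rw [cell_set2 _ _ _ _ _ _ hm (hi' h1) (hj' h1) hp hq, if_neg (fun h => h2 ⟨h1, h⟩)]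
  · exact absurd h3.1 h1
  · rfl

lemma shape_stepA (b : List (List Int)) (mc : Int) (vb : List (List Int)) (i j : Int)
    (h : Shape vb) : Shape (stepA b mc vb i j) := by
  unfold stepA
  split_ifs <;> (repeat' apply shape_set2) <;> exact h

lemma cell_stepA (b : List (List Int)) (mc : Int) (vb : List (List Int)) (i j : Int) (p q : Nat)
    (hm : Shape vb) (hi : 0 ≤ i) (hi4 : i ≤ 4) (hj : 0 ≤ j) (hj4 : j ≤ 4) (hp : p < 5) (hq : q < 5) :
    cell (stepA b mc vb i j) p q = if hitA b mc i j p q then 1 else cell vb p q := by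
  unfold stepA
  by_cases hc : pyCell b i j = 1
  · simp only [if_pos hc]
    by_cases hmc : mc > 0
    · simp only [if_pos hmc]
      have s1 := shape_set2 vb i j 1 hm
      have s2 : Shape (if i > 0 then pySet2 (pySet2 vb i j 1) (i-1) j 1 else pySet2 vb i j 1) := by
        split <;> [exact shape_set2 _ _ _ _ s1; exact s1]
      have s3 : Shape (if i < 4 then pySet2 (if i > 0 then pySet2 (pySet2 vb i j 1) (i-1) j 1 else pySet2 vb i j 1) (i+1) j 1 else (if i > 0 then pySet2 (pySet2 vb i j 1) (i-1) j 1 else pySet2 vb i j 1)) := by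
        split <;> [exact shape_set2 _ _ _ _ s2; exact s2]
      have s4 : Shape (if j > 0 then pySet2 (if i < 4 then pySet2 (if i > 0 then pySet2 (pySet2 vb i j 1) (i-1) j 1 else pySet2 vb i j 1) (i+1) j 1 else (if i > 0 then pySet2 (pySet2 vb i j 1) (i-1) j 1 else pySet2 vb i j 1)) i (j-1) 1 else (if i < 4 then pySet2 (if i > 0 then pySet2 (pySet2 vb i j 1) (i-1) j 1 else pySet2 vb i j 1) (i+1) j 1 else (if i > 0 then pySet2 (pySet2 vb i j 1) (i-1) j 1 else pySet2 vb i j 1))) := by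
        split <;> [exact shape_set2 _ _ _ _ s3; exact s3]
      rw [cell_cset _ _ _ _ _ _ s4 (fun _ => by omega) (fun _ => by omega) hp hq,
          cell_cset _ _ _ _ _ _ s3 (fun _ => by omega) (fun _ => by omega) hp hq,
          cell_cset _ _ _ _ _ _ s2 (fun h => by omega) (fun _ => by omega) hp hq,
          cell_cset _ _ _ _ _ _ s1 (fun h => by omega) (fun _ => by omega) hp hq,
          cell_set2 _ _ _ _ _ _ hm hi hj hp hq, hitA]
      simp only [hc, hmc, decide_eq_true_eq, true_and]
      split_ifs <;> first | rfl | omega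
    · simp only [if_neg hmc]
      rw [cell_set2 _ _ _ _ _ _ hm hi hj hp hq, hitA]
      simp only [hc, hmc, decide_eq_true_eq, true_and]
      split_ifs <;> first | rfl | (exfalso; omega) | tauto
  · rw [if_neg hc, hitA]
    simp [hc]

lemma shape_foldJ (b : List (List Int)) (mc : Int) (i : Int) (js : List Int) (m : List (List Int))
    (hm : Shape m) : Shape (js.foldl (fun vb j => stepA b mc vb i j) m) := by
  induction js generalizing m with
  | nil => exact hm
  | cons j js ih => exact ih _ (shape_stepA b mc m i j hm)

lemma cell_foldJ (b : List (List Int)) (mc : Int) (i : Int) (js : List Int) (m : List (List Int))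
    (p q : Nat) (hm : Shape m) (hi : 0 ≤ i) (hi4 : i ≤ 4)
    (hjs : ∀ j ∈ js, 0 ≤ j ∧ j ≤ 4) (hp : p < 5) (hq : q < 5) :
    cell (js.foldl (fun vb j => stepA b mc vb i j) m) p q
      = if js.any (fun j => hitA b mc i j p q) then 1 else cell m p q := by
  induction js generalizing m with
  | nil => simp
  | cons j js ih =>
    simp only [List.foldl_cons, List.any_cons]
    rw [ih _ (shape_stepA b mc m i j hm) (fun x hx => hjs x (List.mem_cons_of_mem _ hx)),
        cell_stepA b mc m i j p q hm hi hi4 (hjs j (List.mem_cons_self)).1 (hjs j (List.mem_cons_self)).2 hp hq]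
    by_cases h1 : hitA b mc i j p q <;> by_cases h2 : js.any (fun j => hitA b mc i j p q) <;> simp [h1, h2]

lemma shape_foldI (b : List (List Int)) (mc : Int) (is : List Int) (m : List (List Int))
    (hm : Shape m) :
    Shape (is.foldl (fun vb i => (PySem.List.pyRange 0 5 1).foldl (fun vb j => stepA b mc vb i j) vb) m) := by
  induction is generalizing m with
  | nil => exact hm
  | cons i is ih => exact ih _ (shape_foldJ b mc i _ m hm)

lemma cell_foldI (b : List (List Int)) (mc : Int) (is : List Int) (m : List (List Int))
    (p q : Nat) (hm : Shape m) (his : ∀ i ∈ is, 0 ≤ i ∧ i ≤ 4) (hp : p < 5) (hq : q < 5) :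
    cell (is.foldl (fun vb i => (PySem.List.pyRange 0 5 1).foldl (fun vb j => stepA b mc vb i j) vb) m) p q
      = if is.any (fun i => (PySem.List.pyRange 0 5 1).any (fun j => hitA b mc i j p q)) then 1
        else cell m p q := by
  induction is generalizing m with
  | nil => simp
  | cons i is ih =>
    simp only [List.foldl_cons, List.any_cons]
    rw [ih _ (shape_foldJ b mc i _ m hm) (fun x hx => his x (List.mem_cons_of_mem _ hx)),
        cell_foldJ b mc i _ m p q hm (his i List.mem_cons_self).1 (his i List.mem_cons_self).2
          (by rw [range5]; intro x hx; fin_cases hx <;> omega) hp hq]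
    by_cases h1 : (PySem.List.pyRange 0 5 1).any (fun j => hitA b mc i j p q) <;>
      by_cases h2 : is.any (fun i => (PySem.List.pyRange 0 5 1).any (fun j => hitA b mc i j p q)) <;>
      simp [h1, h2]

lemma matrix_ext (m m' : List (List Int)) (hm : Shape m) (hm' : Shape m')
    (h : ∀ p q : Nat, p < 5 → q < 5 → cell m p q = cell m' p q) : m = m' := by
  apply List.ext_getElem (by rw [hm.1, hm'.1])
  intro p h1 h2
  apply List.ext_getElem (by rw [hm.2 _ (List.getElem_mem h1), hm'.2 _ (List.getElem_mem h2)])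
  intro q hq1 hq2
  have hp5 : p < 5 := hm.1 ▸ h1
  have hq5 : q < 5 := by have := hm.2 _ (List.getElem_mem h1); omega
  have hc := h p q hp5 hq5
  simpa [cell, List.getD_eq_getElem?_getD, List.getElem?_eq_getElem, h1, h2, hq1, hq2] using hc

lemma cellA (b : List (List Int)) (mc : Int) (p q : Nat) (hp : p < 5) (hq : q < 5) :
    cell (VisibilitySettings b mc) p q
      = if (PySem.List.pyRange 0 5 1).any (fun i => (PySem.List.pyRange 0 5 1).any (fun j => hitA b mc i j p q)) then 1
        else -1 := by
  unfold VisibilitySettings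
  have hsh : Shape [[(-1 : Int), -1, -1, -1, -1], [-1, -1, -1, -1, -1], [-1, -1, -1, -1, -1], [-1, -1, -1, -1, -1], [-1, -1, -1, -1, -1]] := by
    constructor
    · rfl
    · intro r hr; fin_cases hr <;> rfl
  have hinit : (PySem.List.pyRange 0 5 1).foldl (fun vb _ => vb ++ [[-1, -1, -1, -1, -1]]) ([] : List (List Int))
      = [[-1, -1, -1, -1, -1], [-1, -1, -1, -1, -1], [-1, -1, -1, -1, -1], [-1, -1, -1, -1, -1], [-1, -1, -1, -1, -1]] := by decide
  rw [hinit, cell_foldI b mc _ _ p q hsh (by rw [range5]; intro x hx; fin_cases hx <;> omega) hp hq]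
  congr 1
  interval_cases p <;> interval_cases q <;> rfl

lemma shapeA (b : List (List Int)) (mc : Int) : Shape (VisibilitySettings b mc) := by
  unfold VisibilitySettings
  apply shape_foldI
  constructor
  · decide
  · intro r hr
    have : (PySem.List.pyRange 0 5 1).foldl (fun vb _ => vb ++ [[-1, -1, -1, -1, -1]]) ([] : List (List Int))
        = [[-1, -1, -1, -1, -1], [-1, -1, -1, -1, -1], [-1, -1, -1, -1, -1], [-1, -1, -1, -1, -1], [-1, -1, -1, -1, -1]] := by decide
    rw [this] at hr
    fin_cases hr <;> rfl

lemma shapeB (b : List (List Int)) (mc : Int) : Shape (VisibilitySettings_alt b mc) := by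
  unfold VisibilitySettings_alt
  rw [range5]
  refine ⟨rfl, ?_⟩
  intro r hr
  simp only [List.map_cons, List.map_nil] at hr
  fin_cases hr <;> simp

lemma cellB (b : List (List Int)) (mc : Int) (p q : Nat) (hp : p < 5) (hq : q < 5) :
    cell (VisibilitySettings_alt b mc) p q
      = if pyCell b (p : Int) (q : Int) = 1 then 1
        else if mc > 0 ∧ (((p : Int) > 0 ∧ pyCell b ((p : Int)-1) q = 1)
                        ∨ ((p : Int) < 4 ∧ pyCell b ((p : Int)+1) q = 1)
                        ∨ ((q : Int) > 0 ∧ pyCell b p ((q : Int)-1) = 1)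
                        ∨ ((q : Int) < 4 ∧ pyCell b p ((q : Int)+1) = 1)) then 1
        else -1 := by
  unfold VisibilitySettings_alt
  rw [range5]
  interval_cases p <;> interval_cases q <;> norm_num [cell]

lemma ite_or_split (a b : Prop) [Decidable a] [Decidable b] :
    (if a ∨ b then (1 : Int) else -1) = if a then 1 else if b then 1 else -1 := by
  split_ifs <;> tauto

lemma hit_iff (b : List (List Int)) (mc : Int) (p q : Nat) (hp : p < 5) (hq : q < 5) :
    ((PySem.List.pyRange 0 5 1).any (fun i => (PySem.List.pyRange 0 5 1).any (fun j => hitA b mc i j p q)) = true)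
      ↔ (pyCell b p q = 1 ∨ (mc > 0 ∧ (((p : Int) > 0 ∧ pyCell b ((p : Int)-1) q = 1)
                        ∨ ((p : Int) < 4 ∧ pyCell b ((p : Int)+1) q = 1)
                        ∨ ((q : Int) > 0 ∧ pyCell b p ((q : Int)-1) = 1)
                        ∨ ((q : Int) < 4 ∧ pyCell b p ((q : Int)+1) = 1)))) := by
  simp only [List.any_eq_true, hitA, decide_eq_true_eq, PySem.List.mem_pyRange_one]
  constructor
  · rintro ⟨i, hi, j, hj, hcell, hdisj⟩
    rcases hdisj with ⟨h1, h2⟩ | ⟨hmc, ⟨h1, h2⟩ | ⟨h1, h2⟩ | ⟨h1, h2⟩ | ⟨h1, h2⟩⟩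
    · subst h1; subst h2; exact Or.inl hcell
    · right; refine ⟨hmc, Or.inr (Or.inl ⟨by omega, ?_⟩)⟩
      have e1 : i = (p : Int) + 1 := by omega
      subst e1; subst h2; exact hcell
    · right; refine ⟨hmc, Or.inl ⟨by omega, ?_⟩⟩
      have e1 : i = (p : Int) - 1 := by omega
      subst e1; subst h2; exact hcell
    · right; refine ⟨hmc, Or.inr (Or.inr (Or.inr ⟨by omega, ?_⟩))⟩
      have e1 : j = (q : Int) + 1 := by omega
      subst e1; subst h1; exact hcell
    · right; refine ⟨hmc, Or.inr (Or.inr (Or.inl ⟨by omega, ?_⟩))⟩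
      have e1 : j = (q : Int) - 1 := by omega
      subst e1; subst h1; exact hcell
  · rintro (hcell | ⟨hmc, ⟨hb, hcell⟩ | ⟨hb, hcell⟩ | ⟨hb, hcell⟩ | ⟨hb, hcell⟩⟩)
    · exact ⟨p, ⟨by omega, by omega⟩, q, ⟨by omega, by omega⟩, hcell, Or.inl ⟨rfl, rfl⟩⟩
    · exact ⟨(p : Int) - 1, ⟨by omega, by omega⟩, q, ⟨by omega, by omega⟩, hcell,
        Or.inr ⟨hmc, Or.inr (Or.inl ⟨by omega, by omega⟩)⟩⟩
    · exact ⟨(p : Int) + 1, ⟨by omega, by omega⟩, q, ⟨by omega, by omega⟩, hcell,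
        Or.inr ⟨hmc, Or.inl ⟨by omega, by omega⟩⟩⟩
    · exact ⟨p, ⟨by omega, by omega⟩, (q : Int) - 1, ⟨by omega, by omega⟩, hcell,
        Or.inr ⟨hmc, Or.inr (Or.inr (Or.inr ⟨by omega, by omega⟩))⟩⟩
    · exact ⟨p, ⟨by omega, by omega⟩, (q : Int) + 1, ⟨by omega, by omega⟩, hcell,
        Or.inr ⟨hmc, Or.inr (Or.inr (Or.inl ⟨by omega, by omega⟩))⟩⟩

-- ===== VERDICT (by name: the statement is the Claim_ definition above) =====
theorem VisibilitySettings_spec : Claim_equal_VisibilitySettings := by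
  intro board mc _ _
  unfold Spec_VisibilitySettings
  apply matrix_ext _ _ (shapeA board mc) (shapeB board mc)
  intro p q hp hq
  rw [cellA board mc p q hp hq, cellB board mc p q hp hq,
      if_congr (hit_iff board mc p q hp hq) rfl rfl, ite_or_split]
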